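-- pv_equiv track=rewrite | github.com/leo3oel/Fahrtenprogramm-Generator | Export.py | __markHyperlinks
-- ===== SOURCE A (Python) =====
-- def __markHyperlinks(string):
--     outputString = ""
--     currentWord = ""
--     for char in string:
--         if char == " " or char == "\n" or char == "," or char == ";":
--             if currentWord[0:4] == "www.":
--                 currentWord = "\\href{" + currentWord + "}{" + currentWord + "}"
--             outputString += currentWord + char
--             currentWord = ""
--         else:
--             currentWord += char
--     if currentWord[0:4] == "www.":
--         currentWord = "\\url{" + currentWord + "}"
--     outputString += currentWord
--     return outputString
-- ===== SOURCE B (Python) =====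
-- DELIMS = " \n,;"
--
-- def __markHyperlinks(string):
--     # Scan delimiter-to-delimiter with an index, collect pieces, join once.
--     parts = []
--     rest = string
--     while True:
--         k = 0
--         while k < len(rest) and rest[k] not in DELIMS:
--             k += 1
--         if k == len(rest):
--             break
--         word = rest[:k]
--         if word.startswith("www."):
--             word = "\\href{" + word + "}{" + word + "}"
--         parts.append(word)
--         parts.append(rest[k])
--         rest = rest[k + 1:]
--     if rest.startswith("www."):
--         rest = "\\url{" + rest + "}"
--     parts.append(rest)
--     return "".join(parts)
-- ===== Notes on version B (the rewrite author's own statement) =====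
-- stated objective: alternative
-- what changed: Replaces A's per-character accumulator loop (building currentWord and outputString by repeated +=) with a word-at-a-time scan: find the next delimiter index, wrap the whole slice before it if it starts with 'www.', collect the pieces in a list and join once.
import Mathlib
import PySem

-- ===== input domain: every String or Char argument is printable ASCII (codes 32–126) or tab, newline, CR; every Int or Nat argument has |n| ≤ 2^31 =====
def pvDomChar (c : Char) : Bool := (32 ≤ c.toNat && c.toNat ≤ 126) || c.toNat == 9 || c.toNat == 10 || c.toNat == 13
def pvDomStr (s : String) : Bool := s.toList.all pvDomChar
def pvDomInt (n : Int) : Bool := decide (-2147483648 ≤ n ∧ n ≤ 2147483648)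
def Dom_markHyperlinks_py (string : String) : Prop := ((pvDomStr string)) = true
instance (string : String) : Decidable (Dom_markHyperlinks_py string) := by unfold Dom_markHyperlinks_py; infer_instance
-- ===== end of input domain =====

-- B replaces A's per-character accumulator loop by a word-at-a-time scan that wraps whole
-- slices and joins the collected pieces once (objective: alternative decomposition).

-- ===== PORT A =====
-- shared: the delimiter test `char == " " or char == "\n" or char == "," or char == ";"`
def pvDelim (c : Char) : Bool := c == ' ' || c == '\n' || c == ',' || c == ';'

-- one iteration of A's `for char in string` loop over state (outputString, currentWord)
def pvStepA (st : List Char × List Char) (c : Char) : List Char × List Char :=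
  if pvDelim c then
    let cur := if st.2.take 4 = "www.".toList then
        "\\href{".toList ++ st.2 ++ "}{".toList ++ st.2 ++ "}".toList
      else st.2
    (st.1 ++ cur ++ [c], [])
  else (st.1, st.2 ++ [c])

def markHyperlinks_py (string : String) : String :=
  let st := string.toList.foldl pvStepA ([], [])
  let cur := if st.2.take 4 = "www.".toList then "\\url{".toList ++ st.2 ++ "}".toList else st.2
  String.ofList (st.1 ++ cur)

-- ===== PORT B =====
-- Source B's outer while loop: the inner `while k < len(rest) and rest[k] not in DELIMS` computes
-- the first delimiter position, so rest[:k] / rest[k] / rest[k+1:] are exactly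
-- takeWhile / head / tail-of-dropWhile of the non-delimiter prefix (exact).
def pvGoB (parts : List (List Char)) (rest : List Char) : List Char :=
  if hd : rest.dropWhile (fun c => !pvDelim c) = [] then
    -- k == len(rest): break, wrap the trailing rest with \url if it starts with "www."
    (parts ++ [if PySem.Chars.startswith rest "www.".toList then "\\url{".toList ++ rest ++ "}".toList else rest]).flatten
  else
    pvGoB
      (parts ++
        [(if PySem.Chars.startswith (rest.takeWhile (fun c => !pvDelim c)) "www.".toList then
            "\\href{".toList ++ rest.takeWhile (fun c => !pvDelim c) ++ "}{".toList ++ rest.takeWhile (fun c => !pvDelim c) ++ "}".toList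
          else rest.takeWhile (fun c => !pvDelim c)),
         [(rest.dropWhile (fun c => !pvDelim c)).head hd]])
      (rest.dropWhile (fun c => !pvDelim c)).tail
termination_by rest.length
decreasing_by
  have h1 : (rest.dropWhile (fun c => !pvDelim c)).length ≤ rest.length :=
    List.length_dropWhile_le _ _
  have h2 : (rest.dropWhile (fun c => !pvDelim c)).length ≠ 0 := by simpa using hd
  simp only [List.length_tail]
  omega

def markHyperlinks_py_alt (string : String) : String :=
  String.ofList (pvGoB [] string.toList)

-- ===== PRECONDITION & SPEC =====
def Spec_markHyperlinks_py (string : String) (out : String) : Prop := out = markHyperlinks_py_alt string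
instance (string : String) (out : String) : Decidable (Spec_markHyperlinks_py string out) := by unfold Spec_markHyperlinks_py; infer_instance

-- ===== CLAIM (what is proved, stated in full; the proofs are below) =====
def Claim_equal_markHyperlinks_py : Prop := ∀ (string : String), Dom_markHyperlinks_py string → Spec_markHyperlinks_py string (markHyperlinks_py string)

-- ===== LEMMAS AND PROOFS =====

lemma pv_startswith_take (w : List Char) :
    PySem.Chars.startswith w "www.".toList = decide (w.take 4 = "www.".toList) := by
  by_cases h : w.take 4 = "www.".toList
  · have hp : "www.".toList <+: w := by rw [← h]; exact List.take_prefix _ _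
    have hs : PySem.Chars.startswith w "www.".toList = true :=
      (PySem.Chars.startswith_iff w "www.".toList).mpr hp
    simp [h]
    exact hs
  · have hp : ¬ ("www.".toList <+: w) := by
      intro hp
      obtain ⟨t, rfl⟩ := hp
      simp at h
    simp only [h, decide_false]
    rw [← Bool.not_eq_true, PySem.Chars.startswith_iff]
    exact hp

lemma pv_takeWhile_append (p : Char → Bool) (cur l : List Char) (h : cur.all p = true) :
    (cur ++ l).takeWhile p = cur ++ l.takeWhile p := by
  induction cur with
  | nil => simp
  | cons c cs ih =>
    simp only [List.all_cons, Bool.and_eq_true] at h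
    simp [h.1, ih h.2]

lemma pv_dropWhile_append (p : Char → Bool) (cur l : List Char) (h : cur.all p = true) :
    (cur ++ l).dropWhile p = l.dropWhile p := by
  induction cur with
  | nil => simp
  | cons c cs ih =>
    simp only [List.all_cons, Bool.and_eq_true] at h
    simp [h.1, ih h.2]

lemma pv_main (cs : List Char) : ∀ (cur out : List Char) (parts : List (List Char)),
    cur.all (fun c => !pvDelim c) = true → parts.flatten = out →
    ((cs.foldl pvStepA (out, cur)).1 ++
      (if (cs.foldl pvStepA (out, cur)).2.take 4 = "www.".toList then
        "\\url{".toList ++ (cs.foldl pvStepA (out, cur)).2 ++ "}".toList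
       else (cs.foldl pvStepA (out, cur)).2))
      = pvGoB parts (cur ++ cs) := by
  induction cs with
  | nil =>
    intro cur out parts hcur hout
    have hd : cur.dropWhile (fun c => !pvDelim c) = [] := by
      rw [List.dropWhile_eq_nil_iff]
      intro x hx
      exact (List.all_eq_true.mp hcur) x hx
    rw [List.append_nil, pvGoB, dif_pos hd]
    simp only [List.foldl_nil, pv_startswith_take, List.flatten_append, List.flatten_cons,
      List.flatten_nil, List.append_nil, decide_eq_true_eq, hout]
  | cons c cs ih =>
    intro cur out parts hcur hout
    by_cases hc : pvDelim c = true
    · have hdw : (cur ++ c :: cs).dropWhile (fun c => !pvDelim c) = c :: cs := by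
        rw [pv_dropWhile_append _ _ _ hcur, List.dropWhile_cons_of_neg (by simp [hc])]
      have htw : (cur ++ c :: cs).takeWhile (fun c => !pvDelim c) = cur := by
        rw [pv_takeWhile_append _ _ _ hcur, List.takeWhile_cons_of_neg (by simp [hc]),
          List.append_nil]
      rw [pvGoB, htw, hdw, dif_neg (List.cons_ne_nil _ _)]
      simp only [List.head_cons, List.tail_cons, pv_startswith_take, decide_eq_true_eq]
      have h2 := ih []
        (out ++ (if cur.take 4 = "www.".toList then
            "\\href{".toList ++ cur ++ "}{".toList ++ cur ++ "}".toList else cur) ++ [c])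
        (parts ++ [(if cur.take 4 = "www.".toList then
            "\\href{".toList ++ cur ++ "}{".toList ++ cur ++ "}".toList else cur), [c]])
        (by simp) (by simp [hout])
      rw [List.nil_append] at h2
      rw [← h2]
      simp [List.foldl_cons, pvStepA, hc]
    · have hc' : pvDelim c = false := by simpa using hc
      have hcur' : (cur ++ [c]).all (fun c => !pvDelim c) = true := by
        simp [List.all_append, hcur, hc']
      have h := ih (cur ++ [c]) out parts hcur' hout
      rw [List.append_assoc] at h
      simpa [List.foldl_cons, pvStepA, hc'] using h

-- ===== VERDICT (by name: the statement is the Claim_ definition above) =====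
theorem markHyperlinks_py_spec : Claim_equal_markHyperlinks_py := by
  intro s _
  unfold Spec_markHyperlinks_py markHyperlinks_py markHyperlinks_py_alt
  have h := pv_main s.toList [] [] [] (by simp) rfl
  rw [List.nil_append] at h
  exact congrArg String.ofList h
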